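-- pv_equiv track=rewrite | github.com/hienle1122/6.145 | Assignment 1.1/RunLenEncod.py | run_length_encode_2d
-- ===== SOURCE A (Python) =====
-- def flatten(array):
--     flat_list = []
--     for i in array:
--         if type(i) != list:
--             flat_list.append(i)
--         else:
--             f = flatten(i)
--             for e2 in f:
--                 flat_list.append(e2)
--     return flat_list
--
-- def run_length_encode_2d(array):
--     x = flatten(array)
--     count = 1
--     out = []
--
--     if len(x) == 1:
--         out.append((count, x[0]))
--
--     for i in range(1, len(x)):
--
--         if x[i] == x[i - 1]:
--             count = count + 1
--
--         else:
--             out.append((count, x[i - 1]))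
--             count = 1
--
--         # prints last digit
--         if i == len(x) - 1:
--             out.append((count, x[i]))
--
--     return out
-- ===== SOURCE B (Python) =====
-- from itertools import groupby
--
-- def run_length_encode_2d(array):
--     flat = [e for row in array for e in row]
--     return [(sum(1 for _ in g), v) for v, g in groupby(flat)]
-- ===== Notes on version B (the rewrite author's own statement) =====
-- stated objective: simpler
-- what changed: Flatten by a comprehension and run-length encode with itertools.groupby (one group = one (count, value) pair), removing the index loop, the len==1 special case and the last-element boundary branch.
import Mathlib
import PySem

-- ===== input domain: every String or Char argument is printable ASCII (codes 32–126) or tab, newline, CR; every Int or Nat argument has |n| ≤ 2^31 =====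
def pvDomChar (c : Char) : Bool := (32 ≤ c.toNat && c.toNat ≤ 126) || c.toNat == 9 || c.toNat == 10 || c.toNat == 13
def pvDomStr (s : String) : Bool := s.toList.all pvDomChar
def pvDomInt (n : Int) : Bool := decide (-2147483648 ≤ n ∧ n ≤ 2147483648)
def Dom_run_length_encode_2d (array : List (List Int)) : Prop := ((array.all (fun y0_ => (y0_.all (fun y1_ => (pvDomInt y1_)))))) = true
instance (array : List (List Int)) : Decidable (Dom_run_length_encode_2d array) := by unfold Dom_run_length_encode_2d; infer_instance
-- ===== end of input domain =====

-- B replaces A's index-based RLE loop (with its len==1 special case and last-element branch)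
-- by a comprehension flatten plus groupby-style grouping of consecutive equal values: simpler.

-- ===== PORT A =====
-- A's recursive flatten, specialised to the 2D domain: top-level items are lists, inner items ints.
def flattenA (array : List (List Int)) : List Int :=
  array.foldl (fun flat i => flat ++ i.foldl (fun f e => f ++ [e]) []) []

def run_length_encode_2d (array : List (List Int)) : List (Int × Int) :=
  let x := flattenA array
  let count : Int := 1
  let out : List (Int × Int) := []
  let out := if x.length == 1 then out ++ [(count, PySem.List.pyGetD x 0 0)] else out
  let s := (PySem.List.pyRange 1 (x.length : Int) 1).foldl
    (fun (s : Int × List (Int × Int)) i =>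
      let s :=
        if PySem.List.pyGetD x i 0 == PySem.List.pyGetD x (i - 1) 0 then
          (s.1 + 1, s.2)
        else
          ((1 : Int), s.2 ++ [(s.1, PySem.List.pyGetD x (i - 1) 0)])
      if i == (x.length : Int) - 1 then
        (s.1, s.2 ++ [(s.1, PySem.List.pyGetD x i 0)])
      else s) (count, out)
  s.2

-- ===== PORT B =====
-- comprehension flatten
def flattenB (array : List (List Int)) : List Int := array.flatMap (fun row => row)

-- groupby over the flat list: each maximal run of equal consecutive values yields one (count, value)
def rleB : List Int → List (Int × Int)
  | [] => []
  | a :: t =>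
      ((((1 + (t.takeWhile (fun b => b == a)).length : Nat)) : Int), a)
        :: rleB (t.dropWhile (fun b => b == a))
termination_by l => l.length
decreasing_by
  simp only [List.length_cons]
  exact Nat.lt_succ_of_le (List.length_dropWhile_le _ _)

def run_length_encode_2d_alt (array : List (List Int)) : List (Int × Int) :=
  rleB (flattenB array)

-- ===== PRECONDITION & SPEC =====
def Spec_run_length_encode_2d (array : List (List Int)) (out : List (Int × Int)) : Prop := out = run_length_encode_2d_alt array
instance (array : List (List Int)) (out : List (Int × Int)) : Decidable (Spec_run_length_encode_2d array out) := by unfold Spec_run_length_encode_2d; infer_instance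

-- ===== CLAIM (what is proved, stated in full; the proofs are below) =====
def Claim_equal_run_length_encode_2d : Prop := ∀ (array : List (List Int)), Dom_run_length_encode_2d array → Spec_run_length_encode_2d array (run_length_encode_2d array)

-- ===== LEMMAS AND PROOFS =====

-- A's flatten computes the flat concatenation B uses
theorem flattenA_eq (array : List (List Int)) : flattenA array = flattenB array := by
  have hinner : ∀ i : List Int, i.foldl (fun f e => f ++ [e]) ([] : List Int) = i := by
    intro i
    simp [PySem.List.foldl_append_singleton i ([] : List Int)]
  have outer : ∀ (l : List (List Int)) (acc : List Int),
      l.foldl (fun flat i => flat ++ i.foldl (fun f e => f ++ [e]) []) acc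
        = acc ++ l.flatMap (fun row => row) := by
    intro l
    induction l with
    | nil => intro acc; simp
    | cons h t ih =>
        intro acc
        rw [List.foldl_cons, hinner h, ih, List.flatMap_cons, List.append_assoc]
  simpa [flattenA, flattenB] using outer array []

-- structural companion of A's loop over the remaining suffix (proof-side only):
-- a = previous element, c = current run count
def auxA : Int → Int → List Int → List (Int × Int)
  | _, _, [] => []
  | a, c, b :: t =>
      let c2 : Int := if b == a then c + 1 else 1
      let pre : List (Int × Int) := if b == a then [] else [(c, a)]
      if t.isEmpty then pre ++ [(c2, b)] else pre ++ auxA b c2 t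

theorem pyGetD_append_length (l r : List Int) (y : Int) :
    PySem.List.pyGetD (l ++ y :: r) ((l.length : Int)) 0 = y := by
  rw [PySem.List.pyGetD_natCast]
  simp [List.getD_eq_getElem?_getD]

theorem loopA_eq_auxA (x : List Int) (t : List Int) :
    ∀ (pre : List Int) (a : Int) (c : Int) (out : List (Int × Int)),
    x = pre ++ a :: t →
    (((PySem.List.pyRange ((pre.length : Int) + 1) (x.length : Int) 1).foldl
      (fun (s : Int × List (Int × Int)) i =>
        let s :=
          if PySem.List.pyGetD x i 0 == PySem.List.pyGetD x (i - 1) 0 then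
            (s.1 + 1, s.2)
          else
            ((1 : Int), s.2 ++ [(s.1, PySem.List.pyGetD x (i - 1) 0)])
        if i == (x.length : Int) - 1 then
          (s.1, s.2 ++ [(s.1, PySem.List.pyGetD x i 0)])
        else s) (c, out)).2) = out ++ auxA a c t := by
  induction t with
  | nil =>
      intro pre a c out hx
      have hlen : (x.length : Int) = (pre.length : Int) + 1 := by
        subst hx; simp
      rw [hlen, PySem.List.pyRange_one_eq_nil (le_refl _)]
      simp [auxA]
  | cons b t' ih =>
      intro pre a c out hx
      have hlen : (x.length : Int) = (pre.length : Int) + 2 + (t'.length : Int) := by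
        subst hx; simp; omega
      have hcons : PySem.List.pyRange ((pre.length : Int) + 1) (x.length : Int) 1
          = ((pre.length : Int) + 1) :: PySem.List.pyRange (((pre.length : Int) + 1) + 1) (x.length : Int) 1 :=
        PySem.List.pyRange_one_cons (by rw [hlen]; omega)
      have hgeta : PySem.List.pyGetD x ((pre.length : Int) + 1 - 1) 0 = a := by
        have : ((pre.length : Int) + 1 - 1) = (pre.length : Int) := by omega
        rw [this, hx]
        exact pyGetD_append_length pre (b :: t') a
      have hgetb : PySem.List.pyGetD x ((pre.length : Int) + 1) 0 = b := by
        have hx2 : x = (pre ++ [a]) ++ b :: t' := by rw [hx]; simp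
        have hl : ((pre ++ [a]).length : Int) = (pre.length : Int) + 1 := by simp
        rw [hx2, ← hl]
        exact pyGetD_append_length (pre ++ [a]) t' b
      rw [hcons, List.foldl_cons]
      -- reduce the body at i = pre.length + 1
      cases t' with
      | nil =>
          -- the current index is the last one
          have hlast : (((pre.length : Int) + 1) == (x.length : Int) - 1) = true := by
            simp only [beq_iff_eq]; rw [hlen]; simp only [List.length_nil, Nat.cast_zero]; omega
          have hnil : PySem.List.pyRange (((pre.length : Int) + 1) + 1) (x.length : Int) 1 = [] := by
            apply PySem.List.pyRange_one_eq_nil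
            rw [hlen]; simp only [List.length_nil, Nat.cast_zero]; omega
          simp only [hgeta, hgetb, hlast, if_true, hnil, List.foldl_nil]
          by_cases hba : b = a
          · simp [hba, auxA]
          · have : (b == a) = false := by simp [hba]
            simp [this, auxA]
      | cons b2 t'' =>
          have hlast : (((pre.length : Int) + 1) == (x.length : Int) - 1) = false := by
            simp only [beq_eq_false_iff_ne, ne_eq]; rw [hlen]
            simp only [List.length_cons]
            push_cast
            omega
          have hx2 : x = (pre ++ [a]) ++ b :: b2 :: t'' := by rw [hx]; simp
          have hstep := ih (pre ++ [a]) b (if b == a then c + 1 else 1)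
            (if b == a then out else out ++ [(c, a)]) hx2
          have hl : ((pre ++ [a]).length : Int) + 1 = ((pre.length : Int) + 1) + 1 := by
            simp only [List.length_append, List.length_cons, List.length_nil]
            push_cast
            omega
          rw [hl] at hstep
          by_cases hba : b = a
          · have hbeq : (b == a) = true := by simp [hba]
            simp only [hgeta, hgetb, hbeq, if_true, hlast, if_false, Bool.false_eq_true]
            simp only [hbeq, if_true] at hstep
            rw [hstep]
            have : auxA a c (b :: b2 :: t'') = auxA b (c + 1) (b2 :: t'') := by
              simp [auxA, hbeq]
            rw [this]
          · have hbeq : (b == a) = false := by simp [hba]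
            simp only [hgeta, hgetb, hbeq, Bool.false_eq_true, if_false, hlast]
            simp only [hbeq, Bool.false_eq_true, if_false] at hstep
            rw [hstep]
            have : auxA a c (b :: b2 :: t'') = (c, a) :: auxA b 1 (b2 :: t'') := by
              simp [auxA, hbeq]
            rw [this]
            simp

theorem auxA_eq_rleB (t : List Int) :
    ∀ (a : Int) (c : Int), t ≠ [] →
    auxA a c t =
      ((c + ((t.takeWhile (fun b => b == a)).length : Int), a)
        :: rleB (t.dropWhile (fun b => b == a))) := by
  induction t with
  | nil => intro a c h; exact absurd rfl h
  | cons b t' ih =>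
      intro a c _
      by_cases hba : b = a
      · have hbeq : (b == a) = true := by simp [hba]
        cases t' with
        | nil =>
            simp [auxA, rleB, hba]
        | cons b2 t'' =>
            have h1 : auxA a c (b :: b2 :: t'') = auxA b (c + 1) (b2 :: t'') := by
              simp [auxA, hbeq]
            rw [h1, ih b (c + 1) (by simp)]
            subst hba
            simp only [List.takeWhile_cons, hbeq, List.dropWhile_cons, if_true]
            congr 1
            · simp only [List.length_cons, Prod.mk.injEq]
              push_cast
              exact ⟨by ring, trivial⟩
      · have hbeq : (b == a) = false := by simp [hba]
        cases t' with
        | nil =>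
            simp [auxA, rleB, hbeq]
        | cons b2 t'' =>
            have h1 : auxA a c (b :: b2 :: t'') = (c, a) :: auxA b 1 (b2 :: t'') := by
              simp [auxA, hbeq]
            rw [h1, ih b 1 (by simp)]
            simp only [List.takeWhile_cons, hbeq, List.dropWhile_cons, Bool.false_eq_true, if_false]
            rw [rleB]
            simp only [List.takeWhile_cons, List.dropWhile_cons, beq_iff_eq]
            split_ifs <;> simp

-- ===== VERDICT (by name: the statement is the Claim_ definition above) =====
theorem run_length_encode_2d_spec : Claim_equal_run_length_encode_2d := by
  intro array _
  unfold Spec_run_length_encode_2d run_length_encode_2d run_length_encode_2d_alt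
  rw [flattenA_eq]
  cases hx : flattenB array with
  | nil => simp [rleB, PySem.List.pyRange_one_eq_nil]
  | cons a t =>
      cases t with
      | nil =>
          simp [rleB, PySem.List.pyRange_one_eq_nil, PySem.List.pyGetD]
      | cons b t' =>
          have hloop := loopA_eq_auxA (a :: b :: t') (b :: t') [] a 1 [] (by simp)
          simp only [List.length_nil, Nat.cast_zero, zero_add] at hloop
          have hne : ((a :: b :: t').length == 1) = false := by
            simp only [List.length_cons, beq_eq_false_iff_ne, ne_eq]
            omega
          simp only [hne, Bool.false_eq_true, if_false]
          rw [hloop, auxA_eq_rleB (b :: t') a 1 (by simp), rleB]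
          simp
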